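-- pv_equiv track=rewrite | github.com/yossefaymanzedan/ChatRAG | app/chat_service.py | _match_doc_by_name
-- ===== SOURCE A (Python) =====
-- from typing import Any
--
-- def _match_doc_by_name(file_name: str, docs: list[Any]):
--     target = str(file_name or "").strip().lower()
--     if not target:
--         return None
--     for d in docs:
--         name = str(d["file_name"] if "file_name" in d.keys() else "").strip().lower()
--         if name == target:
--             return d
--     for d in docs:
--         name = str(d["file_name"] if "file_name" in d.keys() else "").strip().lower()
--         if target in name or name in target:
--             return d
--     return None
-- ===== SOURCE B (Python) =====
-- def _match_doc_by_name(file_name, docs):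
--     # Single pass: return immediately on exact match, remember the first
--     # substring match as a fallback; exact-beats-substring priority preserved.
--     target = str(file_name or "").strip().lower()
--     if not target:
--         return None
--     fallback = None
--     for d in docs:
--         name = str(d["file_name"] if "file_name" in d.keys() else "").strip().lower()
--         if name == target:
--             return d
--         if fallback is None and (target in name or name in target):
--             fallback = d
--     return fallback
-- ===== Notes on version B (the rewrite author's own statement) =====
-- stated objective: simpler
-- what changed: Replaces A's two full passes over docs (one for exact matches, a second for substring matches) by a single pass that returns immediately on an exact match and keeps the first substring match in a fallback variable.
import Mathlib
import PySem

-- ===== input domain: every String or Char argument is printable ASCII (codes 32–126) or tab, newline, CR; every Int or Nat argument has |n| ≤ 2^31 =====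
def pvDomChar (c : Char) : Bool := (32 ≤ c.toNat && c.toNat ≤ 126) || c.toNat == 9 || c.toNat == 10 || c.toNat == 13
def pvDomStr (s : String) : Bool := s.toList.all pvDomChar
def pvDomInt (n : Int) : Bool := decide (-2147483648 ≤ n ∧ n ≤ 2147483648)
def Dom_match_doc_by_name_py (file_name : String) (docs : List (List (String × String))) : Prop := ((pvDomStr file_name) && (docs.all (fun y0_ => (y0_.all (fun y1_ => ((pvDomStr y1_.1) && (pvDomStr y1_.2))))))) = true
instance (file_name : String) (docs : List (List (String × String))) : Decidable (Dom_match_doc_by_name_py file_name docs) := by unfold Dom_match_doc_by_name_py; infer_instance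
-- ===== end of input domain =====

-- B replaces A's two passes over docs by a single pass with a fallback variable (objective: simpler).


-- ===== PORT A =====
-- normalized doc name: str(d["file_name"] if "file_name" in d.keys() else "").strip().lower()
def pvDocName (d : List (String × String)) : String :=
  PySem.Str.lower (PySem.Str.strip ((PySem.Dict.mk d).getD "file_name" ""))

-- first loop of A: exact match
def pvExactPass (target : String) : List (List (String × String)) → Option (List (String × String))
  | [] => none
  | d :: rest => if pvDocName d = target then some d else pvExactPass target rest

-- second loop of A: substring match
def pvSubPass (target : String) : List (List (String × String)) → Option (List (String × String))
  | [] => none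
  | d :: rest =>
      if PySem.Str.isIn target (pvDocName d) || PySem.Str.isIn (pvDocName d) target
      then some d else pvSubPass target rest

def match_doc_by_name_py (file_name : String) (docs : List (List (String × String))) : Option (List (String × String)) :=
  let target := PySem.Str.lower (PySem.Str.strip file_name)
  if target = "" then none
  else
    match pvExactPass target docs with
    | some d => some d
    | none => pvSubPass target docs

-- ===== PORT B =====
-- single pass with a fallback accumulator (None until the first substring match)
def pvOnePass (target : String) (fb : Option (List (String × String))) :
    List (List (String × String)) → Option (List (String × String))
  | [] => fb
  | d :: rest =>
      let name := pvDocName d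
      if name = target then some d
      else
        pvOnePass target
          (if fb.isNone && (PySem.Str.isIn target name || PySem.Str.isIn name target)
           then some d else fb) rest

def match_doc_by_name_py_alt (file_name : String) (docs : List (List (String × String))) : Option (List (String × String)) :=
  let target := PySem.Str.lower (PySem.Str.strip file_name)
  if target = "" then none
  else pvOnePass target none docs

-- ===== PRECONDITION & SPEC =====
def Spec_match_doc_by_name_py (file_name : String) (docs : List (List (String × String))) (out : Option (List (String × String))) : Prop := out = match_doc_by_name_py_alt file_name docs
instance (file_name : String) (docs : List (List (String × String))) (out : Option (List (String × String))) : Decidable (Spec_match_doc_by_name_py file_name docs out) := by unfold Spec_match_doc_by_name_py; infer_instance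

-- ===== CLAIM (what is proved, stated in full; the proofs are below) =====
def Claim_equal_match_doc_by_name_py : Prop := ∀ (file_name : String) (docs : List (List (String × String))), Dom_match_doc_by_name_py file_name docs → Spec_match_doc_by_name_py file_name docs (match_doc_by_name_py file_name docs)

-- ===== LEMMAS AND PROOFS =====
-- invariant of B's loop: it returns the first exact match if any, else fb if set,
-- else the first substring match
theorem pvOnePass_eq (target : String) (docs : List (List (String × String))) :
    ∀ fb, pvOnePass target fb docs =
      match pvExactPass target docs with
      | some d => some d
      | none => fb.orElse (fun _ => pvSubPass target docs) := by
  induction docs with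
  | nil => intro fb; cases fb <;> simp [pvOnePass, pvExactPass, pvSubPass, Option.orElse]
  | cons d rest ih =>
    intro fb
    by_cases hx : pvDocName d = target
    · simp [pvOnePass, pvExactPass, hx]
    · simp only [pvOnePass, pvExactPass, pvSubPass, hx, ih]
      cases hex : pvExactPass target rest <;> cases fb <;>
        by_cases hc : (PySem.Str.isIn target (pvDocName d) || PySem.Str.isIn (pvDocName d) target) = true <;>
        simp_all [Option.orElse]

-- ===== VERDICT (by name: the statement is the Claim_ definition above) =====
theorem match_doc_by_name_py_spec : Claim_equal_match_doc_by_name_py := by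
  intro file_name docs _
  unfold Spec_match_doc_by_name_py match_doc_by_name_py match_doc_by_name_py_alt
  by_cases h : PySem.Str.lower (PySem.Str.strip file_name) = ""
  · simp [h]
  · simp only [h, pvOnePass_eq]
    cases pvExactPass (PySem.Str.lower (PySem.Str.strip file_name)) docs <;> simp [Option.orElse]
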